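-- pv_equiv track=rewrite | github.com/1lin24/flask_wx_web_utils | app/utils/id_generator.py | mix_code
-- ===== SOURCE A (Python) =====
-- def mix_code(code, mix_numbers):
--     current_idx = 0
--     max_idx = len(code) - 1
--     for idx in mix_numbers:
--         current_idx += int(idx)
--         current_idx %= max_idx
--         letter = code[current_idx]
--         code1 = code[:current_idx]
--         code2 = code[current_idx+1:]
--         code = letter + code1 + code2
--     return code
-- ===== SOURCE B (Python) =====
-- def _nth_alive_index(slots, k):
--     """Index of the k-th non-None entry of slots (k counted from 0)."""
--     i = 0
--     while True:
--         if slots[i] is not None: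
--             if k == 0:
--                 return i
--             k -= 1
--         i += 1
--
--
-- def mix_code(code, mix_numbers):
--     if not mix_numbers:
--         return code
--     n = len(code)
--     m = len(mix_numbers)
--     # Fixed buffer: m empty front slots, then the characters; a move-to-front
--     # tombstones the picked slot and writes the letter into the next free
--     # front slot, so no string/list is ever re-built inside the loop.
--     slots = [None] * m + list(code)
--     cur = 0
--     for t, d in enumerate(mix_numbers):
--         cur = (cur + int(d)) % (n - 1)
--         i = _nth_alive_index(slots, cur)
--         letter = slots[i]
--         slots[i] = None
--         slots[m - 1 - t] = letter
--     return ''.join(c for c in slots if c is not None)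
-- ===== Notes on version B (the rewrite author's own statement) =====
-- stated objective: alternative
-- what changed: A rebuilds the whole string by slicing and concatenation on every step; B precomputes nothing of the string: it allocates one fixed buffer of m empty front slots followed by the characters, performs each move-to-front as a rank scan for the cur-th alive slot plus a tombstone and a single front-slot write, and joins the alive slots once at the end.
-- outside the precondition, e.g. on mix_code('', [3]): A raises IndexError, B raises IndexError; on mix_code('x', [3]): A raises ZeroDivisionError, B raises ZeroDivisionError
import Mathlib
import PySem

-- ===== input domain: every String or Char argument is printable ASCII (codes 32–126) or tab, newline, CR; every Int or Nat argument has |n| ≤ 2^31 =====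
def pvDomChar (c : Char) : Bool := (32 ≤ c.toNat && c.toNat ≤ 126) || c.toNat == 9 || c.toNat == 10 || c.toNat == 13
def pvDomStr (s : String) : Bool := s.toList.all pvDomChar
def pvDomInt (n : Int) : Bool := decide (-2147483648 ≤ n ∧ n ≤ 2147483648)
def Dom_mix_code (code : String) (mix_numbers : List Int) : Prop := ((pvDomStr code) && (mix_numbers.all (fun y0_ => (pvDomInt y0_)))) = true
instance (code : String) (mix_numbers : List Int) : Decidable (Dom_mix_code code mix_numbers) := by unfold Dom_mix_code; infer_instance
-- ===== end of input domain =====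

-- B replaces A's per-step string slicing/concatenation by a fixed tombstone buffer
-- (m front slots + the characters) with a rank scan; objective: alternative data structure.

-- ===== PORT A =====
-- one loop iteration of A: cur = (cur + idx) % max_idx; move code[cur] to the front
def stepA (maxIdx : Int) (st : Int × List Char) (idx : Int) : Int × List Char :=
  let cur := PySem.Int.mod (st.1 + idx) maxIdx
  let s := st.2
  let letter := PySem.List.pyGetD s cur ' '      -- code[cur]; in range under Pre_
  let code1 := PySem.List.slice s none (some cur)        -- code[:cur]
  let code2 := PySem.List.slice s (some (cur + 1)) none  -- code[cur+1:]
  (cur, letter :: (code1 ++ code2))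

def mix_code (code : String) (mix_numbers : List Int) : String :=
  let maxIdx : Int := (code.toList.length : Int) - 1
  String.ofList ((mix_numbers.foldl (stepA maxIdx) (0, code.toList)).2)

-- ===== PORT B =====
-- _nth_alive_index: index of the k-th non-None entry (none = runs off the end)
def nthAlive : List (Option Char) → Nat → Option Nat
  | [], _ => none
  | none :: rest, k => (nthAlive rest k).map (· + 1)
  | some _ :: rest, k => if k = 0 then some 0 else (nthAlive rest (k - 1)).map (· + 1)

-- one loop iteration of B: tombstone the picked slot, write the letter to front slot m-1-t
def stepB (n m : Nat) (st : Int × Nat × List (Option Char)) (d : Int) :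
    Int × Nat × List (Option Char) :=
  let cur := PySem.Int.mod (st.1 + d) ((n : Int) - 1)
  let t := st.2.1
  let slots := st.2.2
  match nthAlive slots cur.toNat with
  | some i =>
    let letter := (slots.getD i none).getD ' '
    (cur, t + 1, (slots.set i none).set (m - 1 - t) (some letter))
  | none => (cur, t + 1, slots)   -- Python raises here; unreachable under Pre_

def mix_code_alt (code : String) (mix_numbers : List Int) : String :=
  if mix_numbers.isEmpty then code
  else
    let n := code.toList.length
    let m := mix_numbers.length
    let slots0 : List (Option Char) := List.replicate m none ++ code.toList.map some
    String.ofList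
      (((mix_numbers.foldl (stepB n m) (0, 0, slots0)).2.2).filterMap id)

-- ===== PRECONDITION & SPEC =====
-- Pre_ excludes exactly the inputs where Python A raises: with a nonempty mix list,
-- len(code) == 1 gives ZeroDivisionError (% 0) and len(code) == 0 gives IndexError.
def Pre_mix_code (code : String) (mix_numbers : List Int) : Prop :=
  mix_numbers = [] ∨ 2 ≤ code.toList.length
instance (code : String) (mix_numbers : List Int) : Decidable (Pre_mix_code code mix_numbers) := by
  unfold Pre_mix_code; infer_instance

def pvWitness_mix_code : String × List Int := ("ab", [1])

def Spec_mix_code (code : String) (mix_numbers : List Int) (out : String) : Prop := out = mix_code_alt code mix_numbers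
instance (code : String) (mix_numbers : List Int) (out : String) : Decidable (Spec_mix_code code mix_numbers out) := by unfold Spec_mix_code; infer_instance

-- ===== CLAIM (what is proved, stated in full; the proofs are below) =====
def Claim_equal_mix_code : Prop := ∀ (code : String) (mix_numbers : List Int), Dom_mix_code code mix_numbers → Pre_mix_code code mix_numbers → Spec_mix_code code mix_numbers (mix_code code mix_numbers)

-- ===== LEMMAS AND PROOFS =====

-- filterMap id of a none-prefix is empty
theorem filterMap_replicate_none (p : Nat) :
    (List.replicate p (none : Option Char)).filterMap id = [] := by
  induction p with
  | zero => rfl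
  | succ p ih => simp

-- nthAlive skips a none-prefix, shifting the result
theorem nthAlive_replicate_append (p : Nat) (rest : List (Option Char)) (k : Nat) :
    nthAlive (List.replicate p none ++ rest) k = (nthAlive rest k).map (· + p) := by
  induction p with
  | zero => simp [Option.map_id']
  | succ p ih =>
    simp only [List.replicate_succ, List.cons_append, nthAlive, ih, Option.map_map]
    cases nthAlive rest k <;> simp

-- the k-th alive slot exists, holds the k-th alive element, and tombstoning it
-- removes exactly the k-th element of the alive sequence
theorem nthAlive_spec (rest : List (Option Char)) (k : Nat)
    (h : k < (rest.filterMap id).length) :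
    ∃ i, nthAlive rest k = some i ∧ i < rest.length ∧
      rest.getD i none = some ((rest.filterMap id).get ⟨k, h⟩) ∧
      (rest.set i none).filterMap id =
        (rest.filterMap id).take k ++ (rest.filterMap id).drop (k + 1) := by
  induction rest generalizing k with
  | nil => simp at h
  | cons o rest ih =>
    cases o with
    | none =>
      simp only [List.filterMap_cons, id_eq] at h ⊢
      obtain ⟨i, h1, h2, h3, h4⟩ := ih k h
      exact ⟨i + 1, by simp [nthAlive, h1], by simpa using h2, by simpa using h3,
        by simp only [List.set_cons_succ]; simpa using h4⟩
    | some c =>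
      cases k with
      | zero =>
        refine ⟨0, by simp [nthAlive], by simp, by simp, ?_⟩
        simp
      | succ k =>
        simp only [List.filterMap_cons, id_eq, List.length_cons, Nat.succ_lt_succ_iff] at h
        obtain ⟨i, h1, h2, h3, h4⟩ := ih k h
        refine ⟨i + 1, by simp [nthAlive, h1], by simpa using h2, ?_, ?_⟩
        · simpa using h3
        · simp only [List.set_cons_succ]; simpa using h4

-- main loop correspondence: A's string is the alive sequence of B's buffer
theorem loop_eq (n m : Nat) (hn : 2 ≤ n) :
    ∀ (l : List Int) (t : Nat) (cur : Int) (s : List Char) (rest : List (Option Char)),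
      s.length = n → rest.filterMap id = s → t + l.length ≤ m →
      (l.foldl (stepA ((n : Int) - 1)) (cur, s)).2 =
        ((l.foldl (stepB n m) (cur, t, List.replicate (m - t) none ++ rest)).2.2).filterMap id := by
  intro l
  induction l with
  | nil =>
    intro t cur s rest hs hrest _
    simp only [List.foldl_nil, List.filterMap_append, filterMap_replicate_none,
      List.nil_append, hrest]
  | cons d l ih =>
    intro t cur s rest hs hrest hle
    have hpos : (0 : Int) < (n : Int) - 1 := by
      have : (2 : Int) ≤ (n : Int) := by exact_mod_cast hn
      omega
    set cur' := PySem.Int.mod (cur + d) ((n : Int) - 1) with hcur'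
    have h0 : 0 ≤ cur' := PySem.Int.mod_nonneg (cur + d) hpos
    have hlt : cur' < (n : Int) - 1 := PySem.Int.mod_lt (cur + d) hpos
    set k := cur'.toNat with hk
    have hkn : k < n := by omega
    have hks : k < s.length := by omega
    have hkf : k < (rest.filterMap id).length := by rw [hrest]; exact hks
    obtain ⟨i, hfind, hilen, hget, hset⟩ := nthAlive_spec rest k hkf
    have htm : t < m := by simp at hle; omega
    have hp1 : m - t = (m - t - 1) + 1 := by omega
    -- unfold one A step
    have hA : stepA ((n : Int) - 1) (cur, s) d =
        (cur', s[k] :: (s.take k ++ s.drop (k + 1))) := by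
      simp only [stepA, ← hcur']
      have hlet : PySem.List.pyGetD s cur' ' ' = s[k] :=
        PySem.List.pyGetD_eq_getElem s ' ' h0 (by rw [hs]; omega)
      have hc1 : PySem.List.slice s none (some cur') = s.take k :=
        PySem.List.slice_to s h0
      have hc2 : PySem.List.slice s (some (cur' + 1)) none = s.drop (k + 1) := by
        rw [PySem.List.slice_from s (show (0:Int) ≤ cur' + 1 by omega)]
        congr 1
        omega
      rw [hlet, hc1, hc2]
    -- unfold one B step
    have hfind' : nthAlive (List.replicate (m - t) none ++ rest) k =
        some (i + (m - t)) := by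
      rw [nthAlive_replicate_append, hfind]; rfl
    have hB : stepB n m (cur, t, List.replicate (m - t) none ++ rest) d =
        (cur', t + 1, List.replicate (m - t - 1) none ++
          (some (s.get ⟨k, hks⟩) :: rest.set i none)) := by
      simp only [stepB, ← hcur', ← hk, hfind']
      congr 1
      congr 1
      -- the picked letter
      have hgetD : (List.replicate (m - t) none ++ rest).getD (i + (m - t)) none =
          rest.getD i none := by
        rw [Nat.add_comm i (m - t)]
        rw [List.getD_append_right _ _ _ _ (by simp)]
        simp
      have hrest' : List.filterMap (fun x => x) rest = s := hrest
      have hletter : ((List.replicate (m - t) none ++ rest).getD (i + (m - t)) none).getD ' ' =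
          s.get ⟨k, hks⟩ := by
        rw [hgetD, hget]
        simp only [Option.getD_some, List.get_eq_getElem]
        simp [hrest']
      rw [hletter]
      -- the two writes
      have hset1 : (List.replicate (m - t) none ++ rest).set (i + (m - t)) none =
          List.replicate (m - t) none ++ rest.set i none := by
        rw [Nat.add_comm i (m - t)]
        rw [List.set_append_right _ _ (by simp)]
        simp
      rw [hset1]
      have hmt : m - 1 - t = m - t - 1 := by omega
      rw [hmt]
      rw [show List.replicate (m - t) (none : Option Char) =
            List.replicate (m - t - 1) none ++ [none] by
          rw [hp1]; exact List.replicate_succ' ..]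
      rw [List.append_assoc]
      rw [List.set_append_right _ _ (by simp)]
      simp
    rw [List.foldl_cons, List.foldl_cons, hA, hB]
    have hnews : (s[k] :: (s.take k ++ s.drop (k + 1))).length = n := by
      simp
      omega
    have hset' : List.filterMap (fun x => x) (rest.set i none) =
        s.take k ++ s.drop (k + 1) := by
      have h := hset
      rw [hrest] at h
      exact h
    have hnewrest : (some (s.get ⟨k, hks⟩) :: rest.set i none).filterMap id =
        s[k] :: (s.take k ++ s.drop (k + 1)) := by
      simp only [List.filterMap_cons, id_eq]
      rw [hset']
      rfl
    have := ih (t + 1) cur' (s[k] :: (s.take k ++ s.drop (k + 1)))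
      (some (s.get ⟨k, hks⟩) :: rest.set i none) hnews hnewrest (by simp at hle ⊢; omega)
    rw [this]
    simp [Nat.sub_sub]

-- ===== VERDICT (by name: the statement is the Claim_ definition above) =====
theorem mix_code_spec : Claim_equal_mix_code := by
  intro code mix_numbers _ hpre
  unfold Spec_mix_code mix_code mix_code_alt
  cases mix_numbers with
  | nil => exact String.ofList_toList
  | cons d l =>
    have hn : 2 ≤ code.toList.length := by
      rcases hpre with h | h
      · exact absurd h (by simp)
      · exact h
    simp only [List.isEmpty_cons]
    have := loop_eq code.toList.length (d :: l).length hn (d :: l) 0 0 code.toList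
      (code.toList.map some) rfl (by simp) (by simp)
    simp only [Nat.sub_zero] at this
    rw [this]
    rfl
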